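-- pv_equiv track=rewrite | github.com/r-jelly/program-solving | baekjoon/1941.py | dfs
-- ===== SOURCE A (Python) =====
-- from typing import List, Tuple
-- from collections import deque
--
-- def dfs(board: List[List[str]], start: int, stack: List[str], count_not_S: int):
--     if count_not_S >= 4:
--         return 0
--
--     if len(stack) == 7:
--         return check_available(stack)
--
--     available_count = 0
--     for idx in range(start, 25):
--         cur_i, cur_j = idx//5, idx%5
--
--         stack.append((cur_i, cur_j))
--         available_count += dfs(board, idx+1, stack, count_not_S+int(board[cur_i][cur_j]!='S'))
--         stack.pop()
--     return available_count
--
-- def check_available(point_list: List[Tuple[int, int]]):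
--     visited = [False] * len(point_list)
--     visited[0] = True
--     queue = deque([point_list[0]])
--
--     while queue:
--         cur_i, cur_j = queue.popleft()
--
--         for di, dj in [(1, 0), (-1, 0), (0, 1), (0, -1)]:
--             next_i, next_j = cur_i + di, cur_j + dj
--             if not (0<=next_i<5 and 0<=next_j<5):
--                 continue
--             if (next_i, next_j) not in point_list:
--                 continue
--
--             cur_idx = point_list.index((next_i, next_j))
--             if visited[cur_idx]:
--                 continue
--             visited[cur_idx] = True
--             queue.append((next_i, next_j))
--
--     if all(visited):
--         return 1
--     else:
--         return 0
-- ===== SOURCE B (Python) =====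
-- def _connected(points):
--     # a valid figure needs 7 distinct cells; with duplicates it can never be connected
--     if len(set(points)) != len(points):
--         return 0
--     pts = set(points)
--     seen = {points[0]}
--     frontier = [points[0]]
--     while frontier:
--         nxt = []
--         for ci, cj in frontier:
--             for p in ((ci + 1, cj), (ci - 1, cj), (ci, cj + 1), (ci, cj - 1)):
--                 ni, nj = p
--                 if 0 <= ni < 5 and 0 <= nj < 5 and p in pts and p not in seen:
--                     seen.add(p)
--                     nxt.append(p)
--         frontier = nxt
--     return 1 if len(seen) == len(points) else 0
--
--
-- def dfs(board, start, stack, count_not_S):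
--     if count_not_S >= 4:
--         return 0
--     need = 7 - len(stack)
--     if need == 0:
--         return _connected(stack)
--     # include/exclude recursion on the cell at index `start`, pruned when the
--     # remaining cells cannot complete a 7-set
--     if start >= 25 or 25 - start < need:
--         return 0
--     i, j = divmod(start, 5)
--     return (dfs(board, start + 1, stack + [(i, j)],
--                 count_not_S + (board[i][j] != 'S'))
--             + dfs(board, start + 1, stack, count_not_S))
-- ===== Notes on version B (the rewrite author's own statement) =====
-- stated objective: alternative
-- what changed: A's per-node 25-way loop recursion becomes a pruned binary include/exclude recursion, and A's index-array BFS with repeated 'in'/list.index scans becomes a duplicate-rejecting frontier-levels closure over a point set (no visited array, no index scans).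
import Mathlib
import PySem

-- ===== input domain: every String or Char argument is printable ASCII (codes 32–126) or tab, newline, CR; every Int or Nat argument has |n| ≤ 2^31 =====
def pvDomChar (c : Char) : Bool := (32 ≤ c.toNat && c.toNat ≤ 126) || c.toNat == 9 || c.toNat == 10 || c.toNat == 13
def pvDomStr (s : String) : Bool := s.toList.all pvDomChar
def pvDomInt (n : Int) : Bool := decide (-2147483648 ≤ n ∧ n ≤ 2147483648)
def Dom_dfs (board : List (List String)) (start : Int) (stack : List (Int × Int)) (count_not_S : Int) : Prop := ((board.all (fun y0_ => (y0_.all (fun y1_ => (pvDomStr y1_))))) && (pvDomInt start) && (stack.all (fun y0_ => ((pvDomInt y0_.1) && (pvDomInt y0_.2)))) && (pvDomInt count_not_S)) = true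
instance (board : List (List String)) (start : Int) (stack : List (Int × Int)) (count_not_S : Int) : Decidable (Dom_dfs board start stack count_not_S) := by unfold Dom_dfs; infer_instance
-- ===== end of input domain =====

-- B replaces A's per-node 25-way loop by a pruned include/exclude recursion and A's
-- index-array BFS (with list.index scans) by a duplicate-rejecting frontier-levels
-- closure over a point set (objective: alternative; return value only — A temporarily
-- mutates `stack` but always restores it).

-- ===== PORT A =====
def pvDirs : List (Int × Int) := [(1, 0), (-1, 0), (0, 1), (0, -1)]

-- board[i][j] (both Pythons read the cell with this same expression; out-of-range
-- access raises in Python and is excluded by Pre_)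
def pvCell (board : List (List String)) (i j : Int) : String :=
  PySem.List.pyGetD (PySem.List.pyGetD board i []) j ""

-- one pass of A's inner `for di, dj in …` loop
def pvStepA (points : List (Int × Int)) (st : List Bool × List (Int × Int)) (cur : Int × Int) :
    List Bool × List (Int × Int) :=
  pvDirs.foldl (fun acc d =>
    let ni := cur.1 + d.1
    let nj := cur.2 + d.2
    if ¬ (0 ≤ ni ∧ ni < 5 ∧ 0 ≤ nj ∧ nj < 5) then acc
    else if ¬ ((ni, nj) ∈ points) then acc
    else
      match PySem.List.index? points (ni, nj) with
      | none => acc  -- unreachable: membership was just checked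
      | some k => if acc.1.getD k false then acc
                  else (acc.1.set k true, acc.2 ++ [(ni, nj)])) st

-- A's `while queue` BFS; fuel (#points + 1) bounds the pops, which Python's loop never exceeds
def pvBfsA (points : List (Int × Int)) : Nat → List Bool → List (Int × Int) → List Bool
  | _, v, [] => v
  | 0, v, _ => v
  | f + 1, v, cur :: q =>
    let s := pvStepA points (v, q) cur
    pvBfsA points f s.1 s.2

def pvCheckA (points : List (Int × Int)) : Int :=
  match points with
  | [] => 0  -- Python raises IndexError on []; dfs only calls this with length 7
  | p :: _ =>
    let v := (List.replicate points.length false).set 0 true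
    let v' := pvBfsA points (points.length + 1) v [p]
    if v'.all (fun b => b) then 1 else 0

mutual
def pvDfsA (board : List (List String)) (fuel : Nat) (start : Int) (stack : List (Int × Int)) (c : Int) : Int :=
  if 4 ≤ c then 0
  else if stack.length = 7 then pvCheckA stack
  else pvLoopA board fuel stack c start
  termination_by (fuel, 1)

def pvLoopA (board : List (List String)) (fuel : Nat) (stack : List (Int × Int)) (c : Int) (idx : Int) : Int :=
  match fuel with
  | 0 => 0
  | f + 1 =>
    if idx < 25 then
      let i := PySem.Int.floordiv idx 5
      let j := PySem.Int.mod idx 5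
      pvDfsA board f (idx + 1) (stack ++ [(i, j)])
          (c + (if pvCell board i j ≠ "S" then 1 else 0))
        + pvLoopA board f stack c (idx + 1)
    else 0
  termination_by (fuel, 0)
end

def dfs (board : List (List String)) (start : Int) (stack : List (Int × Int)) (count_not_S : Int) : Int :=
  pvDfsA board (25 - start).toNat start stack count_not_S

-- ===== PORT B =====
-- the four neighbours of a cell, in Python B's tuple order
def pvNbrs (cur : Int × Int) : List (Int × Int) :=
  [(cur.1 + 1, cur.2), (cur.1 - 1, cur.2), (cur.1, cur.2 + 1), (cur.1, cur.2 - 1)]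

-- B's inner `for p in (...)` loop over one frontier cell: grows (seen, nxt)
def pvVisit (pts : PySem.Set (Int × Int)) (st : PySem.Set (Int × Int) × List (Int × Int)) (cur : Int × Int) :
    PySem.Set (Int × Int) × List (Int × Int) :=
  (pvNbrs cur).foldl (fun acc p =>
    if 0 ≤ p.1 ∧ p.1 < 5 ∧ 0 ≤ p.2 ∧ p.2 < 5 ∧ PySem.Set.contains pts p ∧ ¬ PySem.Set.contains acc.1 p
    then (PySem.Set.add acc.1 p, acc.2 ++ [p]) else acc) st

-- B's `while frontier` loop, one whole frontier level per step; fuel (#points + 1)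
-- bounds the levels, which Python's loop never exceeds
def pvClosure (pts : PySem.Set (Int × Int)) : Nat → PySem.Set (Int × Int) → List (Int × Int) → PySem.Set (Int × Int)
  | _, seen, [] => seen
  | 0, seen, _ => seen
  | f + 1, seen, c :: fr =>
    let s := (c :: fr).foldl (pvVisit pts) (seen, [])
    pvClosure pts f s.1 s.2

def pvCheckB (points : List (Int × Int)) : Int :=
  if (PySem.Set.ofList points).length ≠ points.length then 0
  else
    match PySem.List.pyGet? points 0 with
    | none => 0  -- points[0] raises IndexError in Python; dfs_alt only calls this at length 7
    | some p =>
      let pts := PySem.Set.ofList points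
      let seen := pvClosure pts (points.length + 1) (PySem.Set.add PySem.Set.empty p) [p]
      if seen.length = points.length then 1 else 0

-- grid[p.1][p.2], the same cell read both Pythons perform
def pvCellB (grid : List (List String)) (p : Int × Int) : String :=
  PySem.List.pyGetD (PySem.List.pyGetD grid p.1 []) p.2 ""

def pvDfsB (grid : List (List String)) (fl : Nat) (pos : Int) (pref : List (Int × Int)) (cnt : Int) : Int :=
  if 4 ≤ cnt then 0
  else
    let need : Int := 7 - (pref.length : Int)
    if need = 0 then pvCheckB pref
    else if 25 ≤ pos ∨ 25 - pos < need then 0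
    else
      match fl with
      | 0 => 0  -- unreachable under dfs_alt's fuel
      | g + 1 =>
        let ij := (PySem.Int.divmod? pos 5).getD (0, 0)
        pvDfsB grid g (pos + 1) (pref ++ [ij])
            (cnt + (if pvCellB grid ij ≠ "S" then 1 else 0))
          + pvDfsB grid g (pos + 1) pref cnt
  termination_by fl

def dfs_alt (board : List (List String)) (start : Int) (stack : List (Int × Int)) (count_not_S : Int) : Int :=
  pvDfsB board (25 - start).toNat start stack count_not_S

-- ===== PRECONDITION & SPEC =====
-- Pre_ excludes calls on which the 25-cell scan runs with a board smaller than 5×5 in its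
-- first five rows (Python usually raises IndexError there, though a scan starting near 24
-- touches only the last rows) and scans with negative start, where Python's negative
-- indices silently wrap around the board.
def Pre_dfs (board : List (List String)) (start : Int) (stack : List (Int × Int)) (count_not_S : Int) : Prop :=
  4 ≤ count_not_S ∨ stack.length = 7 ∨ 25 ≤ start ∨
    (0 ≤ start ∧ 5 ≤ board.length ∧ ∀ r ∈ board.take 5, 5 ≤ r.length)
instance (board : List (List String)) (start : Int) (stack : List (Int × Int)) (count_not_S : Int) : Decidable (Pre_dfs board start stack count_not_S) := by unfold Pre_dfs; infer_instance

def pvWitness_dfs : List (List String) × Int × (List (Int × Int)) × Int :=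
  ([["S","S","S","S","S"],["S","S","S","S","S"],["S","S","S","S","S"],
    ["S","S","S","S","S"],["S","S","S","S","S"]], 23, [], 0)

def Spec_dfs (board : List (List String)) (start : Int) (stack : List (Int × Int)) (count_not_S : Int) (out : Int) : Prop := out = dfs_alt board start stack count_not_S
instance (board : List (List String)) (start : Int) (stack : List (Int × Int)) (count_not_S : Int) (out : Int) : Decidable (Spec_dfs board start stack count_not_S out) := by unfold Spec_dfs; infer_instance

-- ===== CLAIM (what is proved, stated in full; the proofs are below) =====
def Claim_equal_dfs : Prop := ∀ (board : List (List String)) (start : Int) (stack : List (Int × Int)) (count_not_S : Int), Dom_dfs board start stack count_not_S → Pre_dfs board start stack count_not_S → Spec_dfs board start stack count_not_S (dfs board start stack count_not_S)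

-- ===== LEMMAS AND PROOFS =====

-- the simulation invariant between A's Bool-array state and B's seen set
def pvInv (points : List (Int × Int)) (v : List Bool) (seen : List (Int × Int)) : Prop :=
  v.length = points.length ∧ seen.Nodup ∧ (∀ x ∈ seen, x ∈ points) ∧
  ∀ j : Nat, j < points.length → (v.getD j false = true ↔ points.getD j (0, 0) ∈ seen)

lemma bfsA_nil (points : List (Int × Int)) (f : Nat) (v : List Bool) :
    pvBfsA points f v [] = v := by cases f <;> rfl

lemma closure_nil (pts : PySem.Set (Int × Int)) (f : Nat) (seen : PySem.Set (Int × Int)) :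
    pvClosure pts f seen [] = seen := by cases f <;> rfl

lemma count_false_set (v : List Bool) : ∀ (k : Nat), k < v.length → v.getD k false = false →
    (v.set k true).count false + 1 = v.count false := by
  induction v with
  | nil => intro k hk; simp at hk
  | cons b t ih =>
    intro k hk hv
    cases k with
    | zero =>
      simp only [List.getD_cons_zero] at hv
      subst hv
      simp
    | succ k =>
      simp only [List.getD_cons_succ] at hv
      simp only [List.length_cons] at hk
      simp only [List.set_cons_succ, List.count_cons]
      have := ih k (by omega) hv
      omega

lemma nbrs_eq_map (cur : Int × Int) :
    pvNbrs cur = pvDirs.map (fun d => (cur.1 + d.1, cur.2 + d.2)) := by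
  simp [pvNbrs, pvDirs, sub_eq_add_neg]

-- A's step body only reads the Bool array and appends to the queue: one direction
lemma stepA1_shift (points : List (Int × Int)) (cur d : Int × Int) (xs : List (Int × Int))
    (a b : List Bool × List (Int × Int)) (h1 : a.1 = b.1) (h2 : a.2 = xs ++ b.2) :
    ((fun (acc : List Bool × List (Int × Int)) (d : Int × Int) =>
        let ni := cur.1 + d.1
        let nj := cur.2 + d.2
        if ¬ (0 ≤ ni ∧ ni < 5 ∧ 0 ≤ nj ∧ nj < 5) then acc
        else if ¬ ((ni, nj) ∈ points) then acc
        else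
          match PySem.List.index? points (ni, nj) with
          | none => acc
          | some k => if acc.1.getD k false then acc
                      else (acc.1.set k true, acc.2 ++ [(ni, nj)])) a d).1
      = ((fun (acc : List Bool × List (Int × Int)) (d : Int × Int) =>
        let ni := cur.1 + d.1
        let nj := cur.2 + d.2
        if ¬ (0 ≤ ni ∧ ni < 5 ∧ 0 ≤ nj ∧ nj < 5) then acc
        else if ¬ ((ni, nj) ∈ points) then acc
        else
          match PySem.List.index? points (ni, nj) with
          | none => acc
          | some k => if acc.1.getD k false then acc
                      else (acc.1.set k true, acc.2 ++ [(ni, nj)])) b d).1 ∧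
    ((fun (acc : List Bool × List (Int × Int)) (d : Int × Int) =>
        let ni := cur.1 + d.1
        let nj := cur.2 + d.2
        if ¬ (0 ≤ ni ∧ ni < 5 ∧ 0 ≤ nj ∧ nj < 5) then acc
        else if ¬ ((ni, nj) ∈ points) then acc
        else
          match PySem.List.index? points (ni, nj) with
          | none => acc
          | some k => if acc.1.getD k false then acc
                      else (acc.1.set k true, acc.2 ++ [(ni, nj)])) a d).2
      = xs ++ ((fun (acc : List Bool × List (Int × Int)) (d : Int × Int) =>
        let ni := cur.1 + d.1
        let nj := cur.2 + d.2
        if ¬ (0 ≤ ni ∧ ni < 5 ∧ 0 ≤ nj ∧ nj < 5) then acc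
        else if ¬ ((ni, nj) ∈ points) then acc
        else
          match PySem.List.index? points (ni, nj) with
          | none => acc
          | some k => if acc.1.getD k false then acc
                      else (acc.1.set k true, acc.2 ++ [(ni, nj)])) b d).2 := by
  dsimp only
  by_cases hr : 0 ≤ cur.1 + d.1 ∧ cur.1 + d.1 < 5 ∧ 0 ≤ cur.2 + d.2 ∧ cur.2 + d.2 < 5
  · rw [if_neg (not_not_intro hr), if_neg (not_not_intro hr)]
    by_cases hm : (cur.1 + d.1, cur.2 + d.2) ∈ points
    · rw [if_neg (not_not_intro hm), if_neg (not_not_intro hm)]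
      cases hidx : PySem.List.index? points (cur.1 + d.1, cur.2 + d.2) with
      | none => exact ⟨h1, h2⟩
      | some k =>
        dsimp only
        rw [h1]
        by_cases hv : b.1.getD k false = true
        · rw [if_pos hv, if_pos hv]; exact ⟨h1, h2⟩
        · rw [if_neg hv, if_neg hv]
          exact ⟨rfl, by dsimp only; rw [h2, List.append_assoc]⟩
    · rw [if_pos hm, if_pos hm]; exact ⟨h1, h2⟩
  · rw [if_pos hr, if_pos hr]; exact ⟨h1, h2⟩

-- A's step only reads the Bool array and appends to the queue: a prefix passes through
lemma stepA_shift (points : List (Int × Int)) (cur : Int × Int) (xs : List (Int × Int)) :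
    ∀ (a b : List Bool × List (Int × Int)), a.1 = b.1 → a.2 = xs ++ b.2 →
      (pvStepA points a cur).1 = (pvStepA points b cur).1 ∧
      (pvStepA points a cur).2 = xs ++ (pvStepA points b cur).2 := by
  unfold pvStepA
  generalize pvDirs = ds
  induction ds with
  | nil => intro a b h1 h2; exact ⟨h1, h2⟩
  | cons d ds ih =>
    intro a b h1 h2
    simp only [List.foldl_cons]
    obtain ⟨k1, k2⟩ := stepA1_shift points cur d xs a b h1 h2
    exact ih _ _ k1 k2

-- running A's BFS through a whole frontier equals folding the step over the frontier
lemma levelA (points : List (Int × Int)) :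
    ∀ (frontier : List (Int × Int)) (fA : Nat) (v : List Bool) (nxt : List (Int × Int)),
      pvBfsA points (frontier.length + fA) v (frontier ++ nxt)
        = pvBfsA points fA (frontier.foldl (fun st c => pvStepA points st c) (v, nxt)).1
            (frontier.foldl (fun st c => pvStepA points st c) (v, nxt)).2 := by
  intro frontier
  induction frontier with
  | nil => intro fA v nxt; simp
  | cons c fr ih =>
    intro fA v nxt
    have hfuel : (c :: fr).length + fA = (fr.length + fA) + 1 := by simp; omega
    rw [hfuel]
    show pvBfsA points ((fr.length + fA) + 1) v (c :: (fr ++ nxt)) = _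
    rw [pvBfsA]
    obtain ⟨h1, h2⟩ := stepA_shift points c fr (v, fr ++ nxt) (v, nxt) rfl rfl
    simp only [List.foldl_cons]
    rw [h1, h2]
    exact ih fA (pvStepA points (v, nxt) c).1 (pvStepA points (v, nxt) c).2

-- levelA with an empty pending queue
lemma levelA' (points : List (Int × Int)) (frontier : List (Int × Int)) (fA : Nat) (v : List Bool) :
    pvBfsA points (frontier.length + fA) v frontier
      = pvBfsA points fA (frontier.foldl (fun st c => pvStepA points st c) (v, [])).1
          (frontier.foldl (fun st c => pvStepA points st c) (v, [])).2 := by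
  have := levelA points frontier fA v []
  rwa [List.append_nil] at this

-- one frontier cell: A's step and B's visit stay related and preserve the measure
lemma step_rel (points : List (Int × Int)) (hnd : points.Nodup) (cur : Int × Int) :
    ∀ (a : List Bool × List (Int × Int)) (b : PySem.Set (Int × Int) × List (Int × Int)),
      pvInv points a.1 b.1 → a.2 = b.2 →
      pvInv points (pvStepA points a cur).1 (pvVisit (PySem.Set.ofList points) b cur).1 ∧
      (pvStepA points a cur).2 = (pvVisit (PySem.Set.ofList points) b cur).2 ∧
      (pvStepA points a cur).1.count false + (pvStepA points a cur).2.length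
        = a.1.count false + a.2.length := by
  unfold pvStepA pvVisit
  simp only [nbrs_eq_map cur, List.foldl_map]
  generalize pvDirs = ds
  induction ds with
  | nil => intro a b h1 h2; exact ⟨h1, h2, rfl⟩
  | cons d ds ih =>
    intro a b h1 h2
    simp only [List.foldl_cons]
    have key :
        pvInv points
          ((fun (acc : List Bool × List (Int × Int)) (d : Int × Int) =>
            let ni := cur.1 + d.1
            let nj := cur.2 + d.2
            if ¬ (0 ≤ ni ∧ ni < 5 ∧ 0 ≤ nj ∧ nj < 5) then acc
            else if ¬ ((ni, nj) ∈ points) then acc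
            else
              match PySem.List.index? points (ni, nj) with
              | none => acc
              | some k => if acc.1.getD k false then acc
                          else (acc.1.set k true, acc.2 ++ [(ni, nj)])) a d).1
          ((fun (acc : PySem.Set (Int × Int) × List (Int × Int)) (p : Int × Int) =>
            if 0 ≤ p.1 ∧ p.1 < 5 ∧ 0 ≤ p.2 ∧ p.2 < 5 ∧ PySem.Set.contains (PySem.Set.ofList points) p ∧ ¬ PySem.Set.contains acc.1 p
            then (PySem.Set.add acc.1 p, acc.2 ++ [p]) else acc) b (cur.1 + d.1, cur.2 + d.2)).1 ∧
        ((fun (acc : List Bool × List (Int × Int)) (d : Int × Int) =>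
            let ni := cur.1 + d.1
            let nj := cur.2 + d.2
            if ¬ (0 ≤ ni ∧ ni < 5 ∧ 0 ≤ nj ∧ nj < 5) then acc
            else if ¬ ((ni, nj) ∈ points) then acc
            else
              match PySem.List.index? points (ni, nj) with
              | none => acc
              | some k => if acc.1.getD k false then acc
                          else (acc.1.set k true, acc.2 ++ [(ni, nj)])) a d).2
          = ((fun (acc : PySem.Set (Int × Int) × List (Int × Int)) (p : Int × Int) =>
            if 0 ≤ p.1 ∧ p.1 < 5 ∧ 0 ≤ p.2 ∧ p.2 < 5 ∧ PySem.Set.contains (PySem.Set.ofList points) p ∧ ¬ PySem.Set.contains acc.1 p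
            then (PySem.Set.add acc.1 p, acc.2 ++ [p]) else acc) b (cur.1 + d.1, cur.2 + d.2)).2 ∧
        ((fun (acc : List Bool × List (Int × Int)) (d : Int × Int) =>
            let ni := cur.1 + d.1
            let nj := cur.2 + d.2
            if ¬ (0 ≤ ni ∧ ni < 5 ∧ 0 ≤ nj ∧ nj < 5) then acc
            else if ¬ ((ni, nj) ∈ points) then acc
            else
              match PySem.List.index? points (ni, nj) with
              | none => acc
              | some k => if acc.1.getD k false then acc
                          else (acc.1.set k true, acc.2 ++ [(ni, nj)])) a d).1.count false
          + ((fun (acc : List Bool × List (Int × Int)) (d : Int × Int) =>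
            let ni := cur.1 + d.1
            let nj := cur.2 + d.2
            if ¬ (0 ≤ ni ∧ ni < 5 ∧ 0 ≤ nj ∧ nj < 5) then acc
            else if ¬ ((ni, nj) ∈ points) then acc
            else
              match PySem.List.index? points (ni, nj) with
              | none => acc
              | some k => if acc.1.getD k false then acc
                          else (acc.1.set k true, acc.2 ++ [(ni, nj)])) a d).2.length
          = a.1.count false + a.2.length := by
      dsimp only
      by_cases hr : 0 ≤ cur.1 + d.1 ∧ cur.1 + d.1 < 5 ∧ 0 ≤ cur.2 + d.2 ∧ cur.2 + d.2 < 5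
      · rw [if_neg (not_not_intro hr)]
        by_cases hm : (cur.1 + d.1, cur.2 + d.2) ∈ points
        · obtain ⟨k, hk⟩ := Option.isSome_iff_exists.mp
            ((PySem.List.index?_isSome_iff points (cur.1 + d.1, cur.2 + d.2)).mpr hm)
          obtain ⟨hklt, hpk, _⟩ := PySem.List.getElem_of_index?_eq_some hk
          have hcontains : PySem.Set.contains (PySem.Set.ofList points) (cur.1 + d.1, cur.2 + d.2) = true := by
            rw [PySem.Set.contains_iff, PySem.Set.mem_ofList]; exact hm
          obtain ⟨hlen, hndseen, hsub, hiff⟩ := h1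
          have hgd : a.1.getD k false = true ↔ (cur.1 + d.1, cur.2 + d.2) ∈ b.1 := by
            have := hiff k hklt
            rwa [List.getD_eq_getElem points (0,0) hklt, hpk] at this
          rw [if_neg (not_not_intro hm), hk]
          dsimp only
          by_cases hv : a.1.getD k false = true
          · have hbc : PySem.Set.contains b.1 (cur.1 + d.1, cur.2 + d.2) = true := by
              rw [PySem.Set.contains_iff]; exact hgd.mp hv
            rw [if_pos hv, if_neg (fun hcond => hcond.2.2.2.2.2 hbc)]
            exact ⟨⟨hlen, hndseen, hsub, hiff⟩, h2, rfl⟩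
          · have hnotmem : (cur.1 + d.1, cur.2 + d.2) ∉ b.1 := fun hmem => hv (hgd.mpr hmem)
            have hbc : ¬ PySem.Set.contains b.1 (cur.1 + d.1, cur.2 + d.2) = true := by
              rw [PySem.Set.contains_iff]; exact hnotmem
            rw [if_neg hv, if_pos ⟨hr.1, hr.2.1, hr.2.2.1, hr.2.2.2, hcontains, hbc⟩]
            refine ⟨⟨by simp [hlen], PySem.Set.nodup_add _ _ hndseen, ?_, ?_⟩, by rw [h2], ?_⟩
            · intro x hx
              rcases (PySem.Set.mem_add _ _ _).mp hx with hx | hx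
              · exact hsub x hx
              · subst hx; exact hm
            · intro j hj
              have hjv : j < a.1.length := by omega
              by_cases hjk : j = k
              · subst hjk
                rw [List.getD_eq_getElem _ false (by simpa using hjv),
                  List.getElem_set_self, List.getD_eq_getElem points (0,0) hj, hpk]
                simp [PySem.Set.mem_add]
              · rw [List.getD_eq_getElem _ false (by simpa using hjv),
                  List.getElem_set_ne (fun h => hjk h.symm), ← List.getD_eq_getElem a.1 false hjv,
                  hiff j hj, PySem.Set.mem_add]
                constructor
                · intro h; exact Or.inl h
                · rintro (h | h)
                  · exact h
                  · exfalso
                    have : points.getD j (0,0) = points[k] := by rw [hpk]; exact h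
                    rw [List.getD_eq_getElem points (0,0) hj] at this
                    exact hjk ((List.Nodup.getElem_inj_iff hnd).mp this)
            · have hvf : a.1.getD k false = false := by
                cases h : a.1.getD k false
                · rfl
                · exact absurd h hv
              have := count_false_set a.1 k (by omega) hvf
              simp only [List.length_append, List.length_cons, List.length_nil]
              omega
        · have hnc : PySem.Set.contains (PySem.Set.ofList points) (cur.1 + d.1, cur.2 + d.2) ≠ true :=
            fun h => hm ((PySem.Set.mem_ofList points _).mp ((PySem.Set.contains_iff _ _).mp h))
          rw [if_pos hm, if_neg (fun hcond => hnc hcond.2.2.2.2.1)]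
          exact ⟨h1, h2, rfl⟩
      · rw [if_pos hr, if_neg (fun hcond => hr ⟨hcond.1, hcond.2.1, hcond.2.2.1, hcond.2.2.2.1⟩)]
        exact ⟨h1, h2, rfl⟩
    obtain ⟨k1, k2, k3⟩ := key
    obtain ⟨m1, m2, m3⟩ := ih _ _ k1 k2
    exact ⟨m1, m2, m3.trans k3⟩

-- a whole frontier: the folds stay related and preserve the measure
lemma level_rel (points : List (Int × Int)) (hnd : points.Nodup) :
    ∀ (frontier : List (Int × Int)) (a : List Bool × List (Int × Int))
      (b : PySem.Set (Int × Int) × List (Int × Int)),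
      pvInv points a.1 b.1 → a.2 = b.2 →
      pvInv points (frontier.foldl (fun st c => pvStepA points st c) a).1
        (frontier.foldl (pvVisit (PySem.Set.ofList points)) b).1 ∧
      (frontier.foldl (fun st c => pvStepA points st c) a).2
        = (frontier.foldl (pvVisit (PySem.Set.ofList points)) b).2 ∧
      (frontier.foldl (fun st c => pvStepA points st c) a).1.count false
          + (frontier.foldl (fun st c => pvStepA points st c) a).2.length
        = a.1.count false + a.2.length := by
  intro frontier
  induction frontier with
  | nil => intro a b h1 h2; exact ⟨h1, h2, rfl⟩
  | cons c fr ih =>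
    intro a b h1 h2
    simp only [List.foldl_cons]
    obtain ⟨k1, k2, k3⟩ := step_rel points hnd c a b h1 h2
    obtain ⟨m1, m2, m3⟩ := ih _ _ k1 k2
    exact ⟨m1, m2, m3.trans k3⟩

-- the main simulation: given enough fuel on both sides, the invariant survives both loops
lemma sim (points : List (Int × Int)) (hnd : points.Nodup) :
    ∀ (fB : Nat) (v : List Bool) (seen frontier : List (Int × Int)) (fA : Nat),
      pvInv points v seen →
      frontier.length + v.count false ≤ fA →
      (frontier = [] ∨ v.count false + 1 ≤ fB) →
      pvInv points (pvBfsA points fA v frontier)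
        (pvClosure (PySem.Set.ofList points) fB seen frontier) := by
  intro fB
  induction fB with
  | zero =>
    intro v seen frontier fA hInv hfa hfb
    rcases hfb with hfb | hfb
    · subst hfb; rw [bfsA_nil, closure_nil]; exact hInv
    · omega
  | succ fB ih =>
    intro v seen frontier fA hInv hfa hfb
    cases frontier with
    | nil => rw [bfsA_nil, closure_nil]; exact hInv
    | cons c fr =>
      rw [pvClosure]
      have hfa1 : (c :: fr).length ≤ fA := by
        have := hfa; simp only [List.length_cons] at *; omega
      have hfA : fA = (c :: fr).length + (fA - (c :: fr).length) := by omega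
      rw [hfA, levelA' points (c :: fr)]
      obtain ⟨k1, k2, k3⟩ := level_rel points hnd (c :: fr) (v, []) (seen, []) hInv rfl
      dsimp only at k3
      simp only [List.length_nil, Nat.add_zero] at k3
      rw [k2]
      refine ih _ _ _ _ k1 ?_ ?_
      · rw [← k2]
        calc (List.foldl (fun st c => pvStepA points st c) (v, []) (c :: fr)).2.length
              + List.count false (List.foldl (fun st c => pvStepA points st c) (v, []) (c :: fr)).1
            = List.count false v := by rw [Nat.add_comm]; exact k3
          _ ≤ fA - (c :: fr).length := Nat.le_sub_of_add_le (by rw [Nat.add_comm]; exact hfa)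
      · by_cases hnil : ((c :: fr).foldl (pvVisit (PySem.Set.ofList points)) (seen, [])).2 = []
        · exact Or.inl hnil
        · right
          have hlen : 1 ≤ ((c :: fr).foldl (pvVisit (PySem.Set.ofList points)) (seen, [])).2.length := by
            cases h : ((c :: fr).foldl (pvVisit (PySem.Set.ofList points)) (seen, [])).2 with
            | nil => exact absurd h hnil
            | cons x xs => simp
          rw [← k2] at hlen
          have h2 : List.count false (List.foldl (fun st c => pvStepA points st c) (v, []) (c :: fr)).1 + 1
              ≤ List.count false v := by
            rw [← k3]; exact Nat.add_le_add_left hlen _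
          have h3 : List.count false v ≤ fB := by
            rcases hfb with h | h
            · exact absurd h (by simp)
            · exact Nat.succ_le_succ_iff.mp h
          exact le_trans h2 h3

-- (ofList xs).length = xs.length exactly when xs has no duplicates
lemma ofList_len_eq_iff (xs : List (Int × Int)) :
    (PySem.Set.ofList xs).length = xs.length ↔ xs.Nodup := by
  constructor
  · intro h
    have hsub : PySem.Set.ofList xs ⊆ xs := fun x hx => (PySem.Set.mem_ofList xs x).mp hx
    have hsp := (PySem.Set.nodup_ofList xs).subperm hsub
    have hperm := hsp.perm_of_length_le (by omega)
    exact hperm.nodup_iff.mp (PySem.Set.nodup_ofList xs)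
  · intro h
    rw [PySem.Set.ofList_eq_self_of_nodup xs h]

-- final test: under the invariant, "all visited" means "seen has full size"
lemma inv_final (points : List (Int × Int)) (hnd : points.Nodup)
    (v : List Bool) (seen : List (Int × Int)) (hInv : pvInv points v seen) :
    (v.all (fun b => b) = true) ↔ seen.length = points.length := by
  obtain ⟨hlen, hndseen, hsub, hiff⟩ := hInv
  constructor
  · intro hall
    have hsub2 : points ⊆ seen := by
      intro x hx
      obtain ⟨j, hj, hxj⟩ := List.mem_iff_getElem.mp hx
      have hjv : j < v.length := by omega
      have hvj : v.getD j false = true := by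
        rw [List.getD_eq_getElem v false hjv]
        exact List.all_eq_true.mp hall _ (List.getElem_mem hjv)
      have := (hiff j hj).mp hvj
      rwa [List.getD_eq_getElem points (0,0) hj, hxj] at this
    have h1 := (hndseen.subperm hsub).length_le
    have h2 := (hnd.subperm hsub2).length_le
    omega
  · intro hl
    have hperm := (hndseen.subperm hsub).perm_of_length_le (by omega)
    have hsub2 : points ⊆ seen := fun x hx => (hperm.mem_iff).mpr hx
    rw [List.all_eq_true]
    intro b hb
    obtain ⟨j, hj, hbj⟩ := List.mem_iff_getElem.mp hb
    have hjp : j < points.length := by omega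
    have : v.getD j false = true := by
      rw [hiff j hjp]
      exact hsub2 (by rw [List.getD_eq_getElem points (0,0) hjp]; exact List.getElem_mem hjp)
    rw [List.getD_eq_getElem v false hj, hbj] at this
    exact this

-- A's visited flags only ever mark the FIRST occurrence of a point
def pvJ (points : List (Int × Int)) (v : List Bool) : Prop :=
  v.length = points.length ∧
  ∀ j : Nat, j < points.length → v.getD j false = true →
    PySem.List.index? points (points.getD j (0, 0)) = some j

lemma stepA_J (points : List (Int × Int)) (cur : Int × Int) :
    ∀ (a : List Bool × List (Int × Int)), pvJ points a.1 → pvJ points (pvStepA points a cur).1 := by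
  unfold pvStepA
  generalize pvDirs = ds
  induction ds with
  | nil => intro a h; exact h
  | cons d ds ih =>
    intro a h
    simp only [List.foldl_cons]
    apply ih
    dsimp only
    by_cases hr : 0 ≤ cur.1 + d.1 ∧ cur.1 + d.1 < 5 ∧ 0 ≤ cur.2 + d.2 ∧ cur.2 + d.2 < 5
    · rw [if_neg (not_not_intro hr)]
      by_cases hm : (cur.1 + d.1, cur.2 + d.2) ∈ points
      · obtain ⟨k, hk⟩ := Option.isSome_iff_exists.mp
          ((PySem.List.index?_isSome_iff points (cur.1 + d.1, cur.2 + d.2)).mpr hm)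
        obtain ⟨hklt, hpk, _⟩ := PySem.List.getElem_of_index?_eq_some hk
        rw [if_neg (not_not_intro hm), hk]
        dsimp only
        by_cases hv : a.1.getD k false = true
        · rw [if_pos hv]; exact h
        · rw [if_neg hv]
          obtain ⟨hlen, hJ⟩ := h
          refine ⟨by simp [hlen], ?_⟩
          intro j hj hset
          by_cases hjk : j = k
          · subst hjk
            rw [List.getD_eq_getElem points (0,0) hj, hpk]
            exact hk
          · apply hJ j hj
            have hjv : j < a.1.length := by omega
            rwa [List.getD_eq_getElem _ false (by simpa using hjv),
              List.getElem_set_ne (fun h => hjk h.symm),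
              ← List.getD_eq_getElem a.1 false hjv] at hset
      · rw [if_pos hm]; exact h
    · rw [if_pos hr]; exact h

lemma bfsA_J (points : List (Int × Int)) :
    ∀ (f : Nat) (v : List Bool) (q : List (Int × Int)), pvJ points v → pvJ points (pvBfsA points f v q) := by
  intro f
  induction f with
  | zero => intro v q h; cases q <;> exact h
  | succ f ih =>
    intro v q h
    cases q with
    | nil => exact h
    | cons c rest =>
      rw [pvBfsA]
      exact ih _ _ (stepA_J points c (v, rest) h)

-- on a duplicated point list A's check always fails
lemma checkA_dup (p : Int × Int) (rest : List (Int × Int)) (hnd : ¬ (p :: rest).Nodup) :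
    pvCheckA (p :: rest) = 0 := by
  have hJ0 : pvJ (p :: rest) ((List.replicate (p :: rest).length false).set 0 true) := by
    constructor
    · simp
    · intro j hj hset
      have hj0 : j = 0 := by
        by_contra hj0
        have hjl : j < (List.replicate (p :: rest).length false).length := by simpa using hj
        rw [List.getD_eq_getElem _ false (by simpa using hjl),
          List.getElem_set_ne (fun h => hj0 h.symm)] at hset
        simp at hset
      subst hj0
      simp only [List.getD_cons_zero]
      exact PySem.List.index?_cons_self p rest
  have hJ := bfsA_J (p :: rest) ((p :: rest).length + 1) _ [p] hJ0
  obtain ⟨i, j, hi, hj, hij, heq⟩ : ∃ (i j : Nat) (hi : i < (p :: rest).length) (hj : j < (p :: rest).length),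
      i ≠ j ∧ (p :: rest)[i] = (p :: rest)[j] := by
    by_contra hc
    push Not at hc
    apply hnd
    rw [List.nodup_iff_injective_getElem]
    intro a b hab
    rcases a with ⟨a, ha⟩; rcases b with ⟨b, hb⟩
    by_contra hne
    exact (hc a b ha hb (by simpa using hne)) hab
  -- arrange i < j
  obtain ⟨i, j, hi, hj, hij, heq⟩ : ∃ (i j : Nat) (hi : i < (p :: rest).length) (hj : j < (p :: rest).length),
      i < j ∧ (p :: rest)[i] = (p :: rest)[j] := by
    rcases Nat.lt_or_ge i j with h | h
    · exact ⟨i, j, hi, hj, h, heq⟩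
    · exact ⟨j, i, hj, hi, by omega, heq.symm⟩
  obtain ⟨hlen, hJ2⟩ := hJ
  have hfalse : (pvBfsA (p :: rest) ((p :: rest).length + 1) ((List.replicate (p :: rest).length false).set 0 true) [p]).getD j false = false := by
    cases hv : (pvBfsA (p :: rest) ((p :: rest).length + 1) ((List.replicate (p :: rest).length false).set 0 true) [p]).getD j false
    · rfl
    · exfalso
      have hidx := hJ2 j hj hv
      obtain ⟨hklt, hpk, hmin⟩ := PySem.List.getElem_of_index?_eq_some hidx
      exact hmin i (by omega) (by rw [List.getD_eq_getElem (p :: rest) (0,0) hj]; exact heq)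
  unfold pvCheckA
  dsimp only
  rw [if_neg]
  intro hall
  have hjlen : j < (pvBfsA (p :: rest) ((p :: rest).length + 1) ((List.replicate (p :: rest).length false).set 0 true) [p]).length := by omega
  have hj2 := List.all_eq_true.mp hall _ (List.getElem_mem hjlen)
  rw [List.getD_eq_getElem _ false hjlen] at hfalse
  rw [hj2] at hfalse
  exact Bool.true_eq_false.mp hfalse

-- the two connectivity checks agree
lemma check_eq (points : List (Int × Int)) : pvCheckA points = pvCheckB points := by
  cases hp : points with
  | nil => rfl
  | cons p rest =>
    by_cases hnd : (p :: rest).Nodup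
    · unfold pvCheckA pvCheckB
      dsimp only
      rw [if_neg (not_not_intro ((ofList_len_eq_iff (p :: rest)).mpr hnd ▸ rfl))]
      have hget : PySem.List.pyGet? (p :: rest) 0 = some p := by
        simp [PySem.List.pyGet?, PySem.List.pyIdx?]
      rw [hget]
      dsimp only
      have hadd : PySem.Set.add PySem.Set.empty p = [p] := rfl
      rw [hadd]
      have hInv0 : pvInv (p :: rest) ((List.replicate (p :: rest).length false).set 0 true) [p] := by
        refine ⟨by simp, List.nodup_singleton p, ?_, ?_⟩
        · intro x hx
          simp only [List.mem_singleton] at hx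
          subst hx; exact List.mem_cons_self
        · intro j hj
          simp only [List.length_cons] at hj
          cases j with
          | zero => simp
          | succ j =>
            constructor
            · intro hset
              exfalso
              have hjl : j + 1 < (List.replicate (p :: rest).length false).length := by simpa using hj
              rw [List.getD_eq_getElem _ false (by simpa using hjl),
                List.getElem_set_ne (by omega)] at hset
              simp at hset
            · intro hmem
              exfalso
              simp only [List.mem_singleton, List.getD_cons_succ] at hmem
              have hjr : j < rest.length := by simpa using hj
              rw [List.getD_eq_getElem rest (0,0) hjr] at hmem
              have : (p :: rest)[j + 1]'(by simpa using hj) = (p :: rest)[0]'(by simp) := by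
                simpa using hmem
              have := (List.Nodup.getElem_inj_iff hnd).mp this
              omega
      have hcount : List.count false ((List.replicate (rest.length + 1) false).set 0 true) = rest.length := by
        simp [List.replicate_succ]
      have hInv := sim (p :: rest) hnd ((p :: rest).length + 1)
        ((List.replicate (p :: rest).length false).set 0 true) [p] [p] ((p :: rest).length + 1)
        hInv0
        (by simp only [List.length_cons, List.length_nil, hcount]; omega)
        (by right; simp only [List.length_cons, hcount]; omega)
      have hiff := inv_final (p :: rest) hnd _ _ hInv
      by_cases hall : (pvBfsA (p :: rest) ((p :: rest).length + 1)
          ((List.replicate (p :: rest).length false).set 0 true) [p]).all (fun b => b) = true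
      · rw [if_pos hall, if_pos (hiff.mp hall)]
      · rw [if_neg hall, if_neg (fun h => hall (hiff.mpr h))]
    · rw [checkA_dup p rest hnd]
      unfold pvCheckB
      rw [if_pos]
      intro hlen
      exact hnd ((ofList_len_eq_iff (p :: rest)).mp hlen)

-- (i, j) = divmod(idx, 5) is exactly (idx // 5, idx % 5)
lemma divmod_getD (s : Int) :
    (PySem.Int.divmod? s 5).getD (0, 0) = (PySem.Int.floordiv s 5, PySem.Int.mod s 5) := by
  simp [PySem.Int.divmod?, PySem.Int.floordiv, PySem.Int.mod]

-- A's scan yields 0 whenever the stack can no longer grow to exactly 7 points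
lemma loop_prune (board : List (List String)) :
    ∀ (fuel : Nat) (stack : List (Int × Int)) (c idx : Int),
      stack.length ≠ 7 → (25 ≤ idx ∨ 25 - idx < 7 - (stack.length : Int)) →
      pvLoopA board fuel stack c idx = 0 := by
  intro fuel
  induction fuel with
  | zero => intro stack c idx _ _; rw [pvLoopA]
  | succ f ih =>
    intro stack c idx hlen hcond
    rw [pvLoopA]
    dsimp only
    by_cases hlt : idx < 25
    · rw [if_pos hlt]
      have hc : 25 - idx < 7 - (stack.length : Int) := by
        rcases hcond with hcond | hcond
        · omega
        · omega
      have hchild : ∀ c' : Int, pvDfsA board f (idx + 1)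
          (stack ++ [(PySem.Int.floordiv idx 5, PySem.Int.mod idx 5)]) c' = 0 := by
        intro c'
        rw [pvDfsA]
        by_cases h4 : 4 ≤ c'
        · rw [if_pos h4]
        · rw [if_neg h4, if_neg (by
            simp only [List.length_append, List.length_cons, List.length_nil]
            omega)]
          exact ih _ _ _ (by simp only [List.length_append, List.length_cons, List.length_nil]; omega)
            (Or.inr (by
              simp only [List.length_append, List.length_cons, List.length_nil]
              push_cast
              omega))
      rw [hchild, ih stack c (idx + 1) hlen (Or.inr (by omega))]
      rfl
    · rw [if_neg hlt]

-- main induction: with fuel 25 - start the two recursions coincide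
lemma main_eq (board : List (List String)) :
    ∀ (n : Nat) (start : Int) (stack : List (Int × Int)) (c : Int),
      n = (25 - start).toNat →
      pvDfsA board n start stack c = pvDfsB board n start stack c := by
  intro n
  induction n with
  | zero =>
    intro start stack c hn
    have hst : (25 : Int) ≤ start := by omega
    rw [pvDfsA, pvDfsB]
    by_cases g1 : 4 ≤ c
    · rw [if_pos g1, if_pos g1]
    · rw [if_neg g1, if_neg g1]
      dsimp only
      by_cases g2 : stack.length = 7
      · rw [if_pos g2, if_pos (show (7 : Int) - (stack.length : Int) = 0 by rw [g2]; norm_num)]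
        exact check_eq stack
      · rw [if_neg g2, if_neg (fun h : (7 : Int) - (stack.length : Int) = 0 => g2 (by omega)),
          if_pos (Or.inl hst : (25 : Int) ≤ start ∨ 25 - start < 7 - (stack.length : Int)),
          pvLoopA]
  | succ f ih =>
    intro start stack c hn
    rw [pvDfsA, pvDfsB]
    by_cases g1 : 4 ≤ c
    · rw [if_pos g1, if_pos g1]
    · rw [if_neg g1, if_neg g1]
      dsimp only
      by_cases g2 : stack.length = 7
      · rw [if_pos g2, if_pos (show (7 : Int) - (stack.length : Int) = 0 by rw [g2]; norm_num)]
        exact check_eq stack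
      · rw [if_neg g2, if_neg (fun h : (7 : Int) - (stack.length : Int) = 0 => g2 (by omega))]
        by_cases g3 : (25 : Int) ≤ start ∨ 25 - start < 7 - (stack.length : Int)
        · rw [if_pos g3]
          exact loop_prune board (f + 1) stack c start g2 g3
        · rw [if_neg g3]
          obtain ⟨g3a, g3b⟩ := not_or.mp g3
          have hstart : start < 25 := by omega
          rw [pvLoopA]
          dsimp only
          rw [if_pos hstart, divmod_getD]
          have hskip : pvLoopA board f stack c (start + 1) = pvDfsA board f (start + 1) stack c := by
            rw [pvDfsA, if_neg g1, if_neg g2]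
          rw [hskip,
            ih (start + 1)
              (stack ++ [(PySem.Int.floordiv start 5, PySem.Int.mod start 5)])
              (c + (if pvCell board (PySem.Int.floordiv start 5) (PySem.Int.mod start 5) ≠ "S" then 1 else 0))
              (by omega),
            ih (start + 1) stack c (by omega)]
          rfl

-- ===== VERDICT (by name: the statement is the Claim_ definition above) =====
theorem dfs_spec : Claim_equal_dfs := by
  intro board start stack c _ _
  unfold Spec_dfs dfs dfs_alt
  exact main_eq board _ start stack c rfl
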